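-- pv_equiv track=rewrite | github.com/zaidnere/sqli-project | backend/app/preprocessing/normalizer.py | _detect_safe_placeholder_list
-- ===== SOURCE A (Python) =====
-- def _detect_safe_placeholder_list(tokens: list[str], eq_idx: int) -> bool:
--     """
--     Detect:  <var> = "?,?,?".join("?" for _ in <iter>)
--             or:    <var> = ",".join(["?"] * <n>)
--             or:    <var> = ",".join("?" * <n>)
--             JS:    <var> = ids.map(() => "?").join(",")
--
--     Strict — must be obvious placeholder list construction, NOT raw value
--     joining. Both `","` and `"?"` (or `"?,"` etc.) must appear; no raw vars
--     interpolated as values.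
--     """
--     n = len(tokens)
--     has_join = False
--     has_q_mark_lit = False
--     has_q_only_strings = True   # all string literals seen in RHS are placeholder-only
--     seen_string = False
--     has_value_var = False  # any variable that could carry raw values?
--     depth = 0
--     i = eq_idx + 1
--     stmt_kw = {"def", "class", "return", "if", "elif", "for", "while",
--                "try", "except", "finally", "with", "import", "from"}
--     while i < n:
--         t = tokens[i]
--         # Boundary check FIRST
--         if depth == 0:
--             if t in (";", "\n"): break
--             if i > eq_idx + 1 and t == "=":
--                 prev_t = tokens[i - 1] if i - 1 >= 0 else None
--                 next_t = tokens[i + 1] if i + 1 < n else None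
--                 if prev_t not in ("=", "!", "<", ">", "+", "-", "*", "/", "%") and next_t != "=":
--                     break
--             if t in stmt_kw and i > eq_idx + 1:
--                 break
--         if t in ("(", "[", "{"):
--             depth += 1
--         elif t in (")", "]", "}"):
--             depth -= 1
--             if depth < 0: break
--         if t == "join":
--             has_join = True
--         # String literals — must contain ONLY ?, comma, space, or be empty
--         if (len(t) >= 2 and t[0] in '"\'`' and t[-1] in '"\'`'):
--             seen_string = True
--             inner = t[1:-1]
--             if "?" in inner:
--                 has_q_mark_lit = True
--             # If the literal contains anything other than ?,  space → not safe
--             if any(c not in "?, " for c in inner):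
--                 has_q_only_strings = False
--         i += 1
--     return has_join and has_q_mark_lit and seen_string and has_q_only_strings
-- ===== SOURCE B (Python) =====
-- def _detect_safe_placeholder_list(tokens: list[str], eq_idx: int) -> bool:
--     n = len(tokens)
--     start = eq_idx + 1
--     stmt_kw = {"def", "class", "return", "if", "elif", "for", "while",
--                "try", "except", "finally", "with", "import", "from"}
--     ops = ("=", "!", "<", ">", "+", "-", "*", "/", "%")
--     # stage 1: annotate each candidate token with its bracket depth (plain scan, no breaks)
--     rows = []
--     d = 0
--     for j in range(start, n):
--         t = tokens[j]
--         rows.append((j, t, d))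
--         if t in ("(", "[", "{"):
--             d += 1
--         elif t in (")", "]", "}"):
--             d -= 1
--     # stage 2: the expression boundary = first annotated row where the statement ends
--     def brk(row):
--         j, t, d = row
--         if d == 0:
--             if t in (";", "\n"):
--                 return True
--             if j > start and t == "=":
--                 prev_t = tokens[j - 1] if j - 1 >= 0 else None
--                 next_t = tokens[j + 1] if j + 1 < n else None
--                 if prev_t not in ops and next_t != "=":
--                     return True
--             if t in stmt_kw and j > start:
--                 return True
--         return t in (")", "]", "}") and d - 1 < 0
--     end_pos = next((k for k, row in enumerate(rows) if brk(row)), len(rows))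
--     # stage 3: declarative aggregation over the delimited RHS tokens
--     rhs = [t for (_, t, _) in rows[:end_pos]]
--     lits = [t[1:-1] for t in rhs
--             if len(t) >= 2 and t[0] in '"\'`' and t[-1] in '"\'`']
--     return ("join" in rhs
--             and any("?" in s for s in lits)
--             and bool(lits)
--             and all(c in "?, " for s in lits for c in s))
-- ===== Notes on version B (the rewrite author's own statement) =====
-- stated objective: alternative
-- what changed: B dismantles A's single stateful while loop (four result flags and four interleaved break conditions) into three independent stages: a break-free scan annotating every candidate token with its bracket depth, a first-match search over the annotated rows with a pure boundary predicate, and a declarative any/all aggregation over the delimited RHS slice.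
import Mathlib
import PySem

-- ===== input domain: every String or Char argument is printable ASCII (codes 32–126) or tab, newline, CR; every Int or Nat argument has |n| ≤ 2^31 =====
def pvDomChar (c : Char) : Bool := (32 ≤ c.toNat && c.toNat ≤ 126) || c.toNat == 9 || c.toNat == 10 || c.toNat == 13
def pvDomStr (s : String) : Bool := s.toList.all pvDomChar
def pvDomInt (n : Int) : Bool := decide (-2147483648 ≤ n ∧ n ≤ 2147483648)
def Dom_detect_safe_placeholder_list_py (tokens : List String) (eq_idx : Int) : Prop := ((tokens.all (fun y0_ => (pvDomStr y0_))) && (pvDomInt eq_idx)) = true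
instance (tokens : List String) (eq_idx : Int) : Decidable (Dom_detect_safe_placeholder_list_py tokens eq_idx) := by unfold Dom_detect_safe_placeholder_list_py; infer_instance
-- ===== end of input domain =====

-- B replaces A's single stateful break-laden while loop by three stages: a plain scan
-- annotating every candidate token with its bracket depth, a first-match search for the
-- statement boundary with a pure predicate, then declarative aggregation ('alternative').

-- ===== PORT A =====
def pvStmtKw : List String := ["def", "class", "return", "if", "elif", "for", "while",
                               "try", "except", "finally", "with", "import", "from"]
def pvOps : List String := ["=", "!", "<", ">", "+", "-", "*", "/", "%"]
def pvQuote (c : Char) : Bool := c == '"' || c == '\'' || c == '`'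
def pvGoodChar (c : Char) : Bool := c == '?' || c == ',' || c == ' '
-- len(t) >= 2 and t[0] in '"\'`' and t[-1] in '"\'`'  (same test in both Pythons)
def pvIsLit (t : String) : Bool :=
  decide (2 ≤ PySem.Str.len t)
    && pvQuote (PySem.List.pyGetD t.toList 0 ' ')
    && pvQuote (PySem.List.pyGetD t.toList (-1) ' ')
-- inner = t[1:-1]  (same in both Pythons)
def pvInner (t : String) : List Char := PySem.List.slice t.toList (some 1) (some (-1))
-- A's composite break condition at token t, position i, current depth
def pvBrk (tokens : List String) (eq_idx n i depth : Int) (t : String) : Bool :=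
  (depth == 0
    && ((t == ";" || t == "\n")
        || (decide (eq_idx + 1 < i) && t == "="
            && (match (if 0 ≤ i - 1 then some (PySem.List.pyGetD tokens (i - 1) "") else none) with
                | none => true
                | some p => !(pvOps.contains p))
            && !((if i + 1 < n then some (PySem.List.pyGetD tokens (i + 1) "") else none) == some "="))
        || (pvStmtKw.contains t && decide (eq_idx + 1 < i))))
  || ((t == ")" || t == "]" || t == "}") && decide (depth - 1 < 0))
def pvDepthStep (t : String) (depth : Int) : Int :=
  if t == "(" || t == "[" || t == "{" then depth + 1
  else if t == ")" || t == "]" || t == "}" then depth - 1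
  else depth
-- A's while loop: one pass carrying all four flags
def pvLoopA (tokens : List String) (eq_idx n : Int) :
    Nat → Int → Int → Bool → Bool → Bool → Bool → Bool
  | 0, _, _, hj, hq, hqo, ss => hj && hq && ss && hqo
  | (f+1), i, depth, hj, hq, hqo, ss =>
    let t := PySem.List.pyGetD tokens i ""
    if pvBrk tokens eq_idx n i depth t then hj && hq && ss && hqo
    else
      let lit := pvIsLit t
      pvLoopA tokens eq_idx n f (i + 1) (pvDepthStep t depth)
        (hj || t == "join")
        (hq || (lit && PySem.Chars.isIn ['?'] (pvInner t)))
        (hqo && !(lit && (pvInner t).any (fun c => !pvGoodChar c)))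
        (ss || lit)
def detect_safe_placeholder_list_py (tokens : List String) (eq_idx : Int) : Bool :=
  let n : Int := tokens.length
  pvLoopA tokens eq_idx n (n - (eq_idx + 1)).toNat (eq_idx + 1) 0 false false true false

-- ===== PORT B =====
-- stage 1: annotate each candidate token with its bracket depth (plain scan, no breaks)
def pvRows (tokens : List String) : Nat → Int → Int → List (Int × String × Int)
  | 0, _, _ => []
  | (f+1), j, d =>
    let t := PySem.List.pyGetD tokens j ""
    (j, t, d) :: pvRows tokens f (j + 1) (pvDepthStep t d)
-- stage 2 predicate: first annotated row where the statement ends (Source B's brk, if-chain)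
def pvBrkRow (tokens : List String) (n start : Int) (row : Int × String × Int) : Bool :=
  let j := row.1
  let t := row.2.1
  let d := row.2.2
  if d == 0 then
    if t == ";" || t == "\n" then true
    else if decide (start < j) && t == "="
            && (match (if 0 ≤ j - 1 then some (PySem.List.pyGetD tokens (j - 1) "") else none) with
                | none => true
                | some p => !(pvOps.contains p))
            && !((if j + 1 < n then some (PySem.List.pyGetD tokens (j + 1) "") else none) == some "=") then true
    else if pvStmtKw.contains t && decide (start < j) then true
    else (t == ")" || t == "]" || t == "}") && decide (d - 1 < 0)
  else (t == ")" || t == "]" || t == "}") && decide (d - 1 < 0)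
def detect_safe_placeholder_list_py_alt (tokens : List String) (eq_idx : Int) : Bool :=
  let n : Int := tokens.length
  let start := eq_idx + 1
  let rows := pvRows tokens (n - start).toNat start 0
  let endPos := (rows.findIdx? (pvBrkRow tokens n start)).getD rows.length
  -- stage 3: declarative aggregation over the delimited RHS tokens
  let rhs := (rows.take endPos).map (fun r => r.2.1)
  let lits := (rhs.filter pvIsLit).map pvInner
  rhs.contains "join"
    && lits.any (fun s => PySem.Chars.isIn ['?'] s)
    && !lits.isEmpty
    && lits.all (fun s => s.all pvGoodChar)

-- ===== PRECONDITION & SPEC =====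
-- Pre_ excludes exactly the inputs where Python raises IndexError: the scan's first index
-- eq_idx+1 below -len(tokens) (both A and B raise there).
def Pre_detect_safe_placeholder_list_py (tokens : List String) (eq_idx : Int) : Prop :=
  -(tokens.length : Int) ≤ eq_idx + 1
instance (tokens : List String) (eq_idx : Int) : Decidable (Pre_detect_safe_placeholder_list_py tokens eq_idx) := by unfold Pre_detect_safe_placeholder_list_py; infer_instance
def pvWitness_detect_safe_placeholder_list_py : List String × Int :=
  (["ids", "=", "\",\"", ".", "join", "(", "[", "\"?\"", "]", "*", "n", ")"], 1)
def Spec_detect_safe_placeholder_list_py (tokens : List String) (eq_idx : Int) (out : Bool) : Prop := out = detect_safe_placeholder_list_py_alt tokens eq_idx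
instance (tokens : List String) (eq_idx : Int) (out : Bool) : Decidable (Spec_detect_safe_placeholder_list_py tokens eq_idx out) := by unfold Spec_detect_safe_placeholder_list_py; infer_instance

-- ===== CLAIM (what is proved, stated in full; the proofs are below) =====
def Claim_equal_detect_safe_placeholder_list_py : Prop := ∀ (tokens : List String) (eq_idx : Int), Dom_detect_safe_placeholder_list_py tokens eq_idx → Pre_detect_safe_placeholder_list_py tokens eq_idx → Spec_detect_safe_placeholder_list_py tokens eq_idx (detect_safe_placeholder_list_py tokens eq_idx)

-- ===== LEMMAS AND PROOFS =====

-- proof-only helper: the index at which A's loop stops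
def pvLoopE (tokens : List String) (eq_idx n : Int) : Nat → Int → Int → Int
  | 0, i, _ => i
  | (f+1), i, depth =>
    let t := PySem.List.pyGetD tokens i ""
    if pvBrk tokens eq_idx n i depth t then i
    else pvLoopE tokens eq_idx n f (i + 1) (pvDepthStep t depth)

-- an if-chain of four tests equals the corresponding boolean combination
lemma pvIfChain (a b1 b2 b3 b4 : Bool) :
    (if a = true then (if b1 = true then true else if b2 = true then true else if b3 = true then true else b4) else b4)
    = ((a && (b1 || b2 || b3)) || b4) := by
  cases a <;> cases b1 <;> cases b2 <;> cases b3 <;> cases b4 <;> rfl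

-- Source B's if-chain break predicate coincides with A's composite one
lemma pvBrkRow_eq (tokens : List String) (eq_idx n j d : Int) (t : String) :
    pvBrkRow tokens n (eq_idx + 1) (j, t, d) = pvBrk tokens eq_idx n j d t := by
  simp only [pvBrkRow, pvBrk]
  exact pvIfChain _ _ _ _ _

-- the end index never moves left
lemma pvLoopE_ge (tokens : List String) (eq_idx n : Int) :
    ∀ (f : Nat) (i depth : Int), i ≤ pvLoopE tokens eq_idx n f i depth := by
  intro f
  induction f with
  | zero => intro i depth; simp [pvLoopE]
  | succ f ih =>
    intro i depth
    simp only [pvLoopE]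
    split
    · exact le_refl i
    · exact le_trans (by omega) (ih (i + 1) _)

-- A's flag-carrying loop equals the aggregation over the tokens up to pvLoopE
lemma pvLoopA_eq (tokens : List String) (eq_idx n : Int) :
    ∀ (f : Nat) (i depth : Int) (hj hq hqo ss : Bool),
      pvLoopA tokens eq_idx n f i depth hj hq hqo ss =
        (let rhs := (PySem.List.pyRange i (pvLoopE tokens eq_idx n f i depth) 1).map
                      (fun j => PySem.List.pyGetD tokens j "")
         let lits := (rhs.filter pvIsLit).map pvInner
         (hj || rhs.any (fun t => t == "join"))
           && (hq || lits.any (fun s => PySem.Chars.isIn ['?'] s))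
           && (ss || !lits.isEmpty)
           && (hqo && lits.all (fun s => !s.any (fun c => !pvGoodChar c)))) := by
  intro f
  induction f with
  | zero =>
    intro i depth hj hq hqo ss
    simp [pvLoopA, pvLoopE, PySem.List.pyRange_one_eq_nil (le_refl i)]
  | succ f ih =>
    intro i depth hj hq hqo ss
    simp only [pvLoopA, pvLoopE]
    split
    · simp [PySem.List.pyRange_one_eq_nil (le_refl i)]
    · rw [ih]
      have hlt : i < pvLoopE tokens eq_idx n f (i + 1) (pvDepthStep (PySem.List.pyGetD tokens i "") depth) :=
        lt_of_lt_of_le (by omega) (pvLoopE_ge tokens eq_idx n f _ _)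
      rw [PySem.List.pyRange_one_cons hlt]
      simp only [List.map_cons, List.any_cons, List.filter_cons]
      by_cases hl : pvIsLit (PySem.List.pyGetD tokens i "")
      · simp only [hl, if_pos, List.map_cons, List.any_cons, List.all_cons,
          List.isEmpty_cons, Bool.true_and]
        cases hj <;> cases hq <;> cases hqo <;> cases ss <;>
          cases h1 : (PySem.List.pyGetD tokens i "" == "join") <;>
          cases h2 : PySem.Chars.isIn ['?'] (pvInner (PySem.List.pyGetD tokens i "")) <;>
          cases h3 : (pvInner (PySem.List.pyGetD tokens i "")).any (fun c => !pvGoodChar c) <;>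
          simp [Bool.and_assoc]
      · simp only [hl, Bool.false_eq_true, Bool.false_and, Bool.or_false, Bool.not_false, Bool.and_true]
        cases hj <;> simp

-- B's first-break truncation of the annotated rows yields exactly the tokens up to pvLoopE
lemma pvRows_take_eq (tokens : List String) (eq_idx n : Int) :
    ∀ (f : Nat) (i depth : Int),
      (let rows := pvRows tokens f i depth
       (rows.take ((rows.findIdx? (pvBrkRow tokens n (eq_idx + 1))).getD rows.length)).map
         (fun r => r.2.1))
      = (PySem.List.pyRange i (pvLoopE tokens eq_idx n f i depth) 1).map
          (fun j => PySem.List.pyGetD tokens j "") := by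
  intro f
  induction f with
  | zero =>
    intro i depth
    simp [pvRows, pvLoopE, PySem.List.pyRange_one_eq_nil (le_refl i)]
  | succ f ih =>
    intro i depth
    simp only [pvRows, pvLoopE, List.findIdx?_cons, pvBrkRow_eq]
    by_cases hb : pvBrk tokens eq_idx n i depth (PySem.List.pyGetD tokens i "") = true
    · simp [hb, PySem.List.pyRange_one_eq_nil (le_refl i)]
    · simp only [hb, Bool.false_eq_true, not_false_eq_true, if_neg]
      have hkey : ∀ (o : Option Nat) (r : Int × String × Int) (rs : List (Int × String × Int)),
          List.take ((o.map (· + 1)).getD (r :: rs).length) (r :: rs)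
            = r :: List.take (o.getD rs.length) rs := by
        intro o r rs; cases o <;> simp
      rw [hkey]
      have hlt : i < pvLoopE tokens eq_idx n f (i + 1) (pvDepthStep (PySem.List.pyGetD tokens i "") depth) :=
        lt_of_lt_of_le (by omega) (pvLoopE_ge tokens eq_idx n f _ _)
      rw [PySem.List.pyRange_one_cons hlt]
      simp only [List.map_cons]
      congr 1
      simpa using ih (i + 1) (pvDepthStep (PySem.List.pyGetD tokens i "") depth)

-- ===== VERDICT (by name: the statement is the Claim_ definition above) =====
theorem detect_safe_placeholder_list_py_spec : Claim_equal_detect_safe_placeholder_list_py := by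
  intro tokens eq_idx _ _
  show detect_safe_placeholder_list_py tokens eq_idx = detect_safe_placeholder_list_py_alt tokens eq_idx
  simp only [detect_safe_placeholder_list_py, detect_safe_placeholder_list_py_alt]
  rw [pvLoopA_eq, ← pvRows_take_eq tokens eq_idx]
  simp only [Bool.false_or, Bool.true_and, List.any_beq', List.all_eq_not_any_not]
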